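-- pv_equiv track=rewrite | github.com/nermadie/CodeForces_Solutions | CodeforcesRound982Div2/prob032.py | solve
-- ===== SOURCE A (Python) =====
-- def solve(n, a):
--     if n == 1:
--         return 1
--     require_length = []
--     for i in range(n):
--         require_length.append(a[i] + i)
--     require_length_sorted = sorted(enumerate(require_length), key=lambda x: x[1])
--     appeared_set = set()
--     appeared_set.add(n)
--     result = n
--     for i in range(n):
--         if require_length_sorted[i][1] >= n * n:
--             continue
--         if require_length_sorted[i][1] in appeared_set:
--             result = max(
--                 result, require_length_sorted[i][1] + require_length_sorted[i][0]
--             )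
--             appeared_set.add(require_length_sorted[i][1] + require_length_sorted[i][0])
--     return result
-- ===== SOURCE B (Python) =====
-- def solve(n, a):
--     # Bellman-Ford-style relaxation: no sorting. Every reachability chain uses
--     # strictly increasing required lengths (a self-edge a[i]+i -> a[i]+2*i with
--     # i == 0 adds nothing new), so n relaxation rounds reach the closure; a round
--     # that adds nothing means the fixpoint is reached, so we stop early then.
--     if n == 1:
--         return 1
--     cap = n * n
--     edges = [(a[i] + i, a[i] + 2 * i) for i in range(n)]
--     reach = {n}
--     for _ in range(n):
--         before = len(reach)
--         for req, prod in edges: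
--             if req < cap and req in reach:
--                 reach.add(prod)
--         if len(reach) == before:
--             break
--     return max(reach)
-- ===== Notes on version B (the rewrite author's own statement) =====
-- stated objective: alternative
-- what changed: Replaces the sort of enumerated (index, required-length) pairs and the single ascending sweep with a set/membership loop by an unsorted Bellman-Ford-style fixpoint: build the edge list (a[i]+i -> a[i]+2i) in index order, run up to n full relaxation rounds over it with an early exit once a round adds nothing, then take max of the reachable set; correct because reachability chains use strictly increasing required lengths, so at most n rounds are needed.
import Mathlib
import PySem

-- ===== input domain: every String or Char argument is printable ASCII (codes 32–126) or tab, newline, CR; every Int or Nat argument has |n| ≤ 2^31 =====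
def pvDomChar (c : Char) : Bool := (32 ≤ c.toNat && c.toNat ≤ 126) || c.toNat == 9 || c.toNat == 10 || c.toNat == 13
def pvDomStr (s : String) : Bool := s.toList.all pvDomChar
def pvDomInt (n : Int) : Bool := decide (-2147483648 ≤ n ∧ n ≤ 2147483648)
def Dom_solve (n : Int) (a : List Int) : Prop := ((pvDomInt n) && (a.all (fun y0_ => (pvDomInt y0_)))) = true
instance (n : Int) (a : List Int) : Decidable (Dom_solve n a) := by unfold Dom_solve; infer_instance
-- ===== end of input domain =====

-- B replaces A's sort of enumerated (index, required-length) pairs + single ascending sweep by an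
-- unsorted Bellman-Ford-style fixpoint: up to n relaxation rounds over the edge list built in index
-- order, stopping once a round adds nothing, then max of the reachable set (a genuinely different
-- algorithm of comparable cost on typical inputs; O(n^2) in the worst case).


-- ===== PORT A =====
def solve (n : Int) (a : List Int) : Int :=
  if n = 1 then 1
  else
    let require_length : List Int :=
      (PySem.List.pyRange 0 n 1).foldl (fun acc i => acc ++ [PySem.List.pyGetD a i 0 + i]) []
    let require_length_sorted :=
      PySem.List.sorted (PySem.List.enumerate require_length) (fun x => x.2)
    let st :=
      (PySem.List.pyRange 0 n 1).foldl
        (fun (st : PySem.Set Int × Int) i =>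
          let e := PySem.List.pyGetD require_length_sorted i (0, 0)
          if e.2 ≥ n * n then st
          else if PySem.Set.contains st.1 e.2 then
            (PySem.Set.add st.1 (e.2 + e.1), max st.2 (e.2 + e.1))
          else st)
        (PySem.Set.add PySem.Set.empty n, n)
    st.2

-- ===== PORT B =====
def solve_alt (n : Int) (a : List Int) : Int :=
  if n = 1 then 1
  else
    let cap := n * n
    let edges : List (Int × Int) :=
      (PySem.List.pyRange 0 n 1).map
        (fun i => (PySem.List.pyGetD a i 0 + i, PySem.List.pyGetD a i 0 + 2 * i))
    let st :=
      (PySem.List.pyRange 0 n 1).foldl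
        (fun (st : PySem.Set Int × Bool) _ =>
          if st.2 then st
          else
            let before := PySem.Set.len st.1
            let s' :=
              edges.foldl
                (fun (s : PySem.Set Int) e =>
                  if e.1 < cap then
                    (if PySem.Set.contains s e.1 then PySem.Set.add s e.2 else s)
                  else s)
                st.1
            if PySem.Set.len s' = before then (s', true) else (s', false))
        (PySem.Set.add PySem.Set.empty n, false)
    (PySem.List.max? st.1 (fun x => x)).getD 0

-- ===== PRECONDITION & SPEC =====
-- Pre excludes exactly the inputs where A raises IndexError: 1 < n with fewer than n list elements.
def Pre_solve (n : Int) (a : List Int) : Prop := 1 < n → n ≤ (a.length : Int)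
instance (n : Int) (a : List Int) : Decidable (Pre_solve n a) := by unfold Pre_solve; infer_instance
def pvWitness_solve : Int × List Int := (3, [2, 0, 1])

def Spec_solve (n : Int) (a : List Int) (out : Int) : Prop := out = solve_alt n a
instance (n : Int) (a : List Int) (out : Int) : Decidable (Spec_solve n a out) := by unfold Spec_solve; infer_instance

-- ===== CLAIM (what is proved, stated in full; the proofs are below) =====
def Claim_equal_solve : Prop := ∀ (n : Int) (a : List Int), Dom_solve n a → Pre_solve n a → Spec_solve n a (solve n a)

-- ===== LEMMAS AND PROOFS =====

-- A's inner-loop body, over the sorted (index, required) pairs.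
def stepA (c : Int) (st : PySem.Set Int × Int) (e : Int × Int) : PySem.Set Int × Int :=
  if e.2 ≥ c then st
  else if PySem.Set.contains st.1 e.2 then
    (PySem.Set.add st.1 (e.2 + e.1), max st.2 (e.2 + e.1))
  else st

-- B's inner-loop body, over (required, produced) edges.
def stepB (c : Int) (s : PySem.Set Int) (e : Int × Int) : PySem.Set Int :=
  if e.1 < c then (if PySem.Set.contains s e.1 then PySem.Set.add s e.2 else s) else s

-- One full relaxation round of B.
def roundB (c : Int) (E : List (Int × Int)) (s : PySem.Set Int) : PySem.Set Int :=
  E.foldl (stepB c) s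

theorem mem_stepA (c : Int) (st : PySem.Set Int × Int) (e : Int × Int) (x : Int)
    (hx : x ∈ st.1) : x ∈ (stepA c st e).1 := by
  unfold stepA; split_ifs <;> simp [PySem.Set.mem_add, hx]

theorem growA (c : Int) (E : List (Int × Int)) :
    ∀ (st : PySem.Set Int × Int) (x : Int), x ∈ st.1 → x ∈ (E.foldl (stepA c) st).1 := by
  induction E with
  | nil => intro st x hx; exact hx
  | cons e tl ih =>
    intro st x hx
    exact ih (stepA c st e) x (mem_stepA c st e x hx)

theorem mem_stepB (c : Int) (s : PySem.Set Int) (e : Int × Int) (x : Int)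
    (hx : x ∈ s) : x ∈ stepB c s e := by
  unfold stepB; split_ifs <;> simp [PySem.Set.mem_add, hx]

theorem growB (c : Int) (E : List (Int × Int)) :
    ∀ (s : PySem.Set Int) (x : Int), x ∈ s → x ∈ roundB c E s := by
  induction E with
  | nil => intro s x hx; exact hx
  | cons e tl ih =>
    intro s x hx
    exact ih (stepB c s e) x (mem_stepB c s e x hx)

theorem stepB_mono (c : Int) (s t : PySem.Set Int) (e : Int × Int)
    (hst : ∀ x, x ∈ s → x ∈ t) : ∀ x, x ∈ stepB c s e → x ∈ stepB c t e := by
  intro x hx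
  unfold stepB at hx ⊢
  by_cases h1 : e.1 < c
  · rw [if_pos h1] at hx ⊢
    by_cases hcs : PySem.Set.contains s e.1
    · have hct : PySem.Set.contains t e.1 = true :=
        (PySem.Set.contains_iff t e.1).2 (hst _ ((PySem.Set.contains_iff s e.1).1 hcs))
      rw [if_pos hcs] at hx
      rw [if_pos hct]
      rcases (PySem.Set.mem_add _ _ _).1 hx with h | h
      · exact (PySem.Set.mem_add _ _ _).2 (Or.inl (hst _ h))
      · exact (PySem.Set.mem_add _ _ _).2 (Or.inr h)
    · rw [if_neg hcs] at hx
      split_ifs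
      · exact (PySem.Set.mem_add _ _ _).2 (Or.inl (hst _ hx))
      · exact hst _ hx
  · rw [if_neg h1] at hx ⊢; exact hst _ hx

theorem roundB_mono (c : Int) (E : List (Int × Int)) :
    ∀ (s t : PySem.Set Int), (∀ x, x ∈ s → x ∈ t) →
    ∀ x, x ∈ roundB c E s → x ∈ roundB c E t := by
  induction E with
  | nil => intro s t hst x hx; exact hst x hx
  | cons e tl ih =>
    intro s t hst x hx
    exact ih (stepB c s e) (stepB c t e) (stepB_mono c s t e hst) x hx

theorem iter_mono (c : Int) (E : List (Int × Int)) :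
    ∀ (k : Nat) (s t : PySem.Set Int), (∀ x, x ∈ s → x ∈ t) →
    ∀ x, x ∈ (roundB c E)^[k] s → x ∈ (roundB c E)^[k] t := by
  intro k
  induction k with
  | zero => intro s t hst x hx; exact hst x hx
  | succ k ih =>
    intro s t hst x hx
    rw [Function.iterate_succ_apply] at hx ⊢
    exact ih (roundB c E s) (roundB c E t) (roundB_mono c E s t hst) x hx

theorem iter_grow (c : Int) (E : List (Int × Int)) :
    ∀ (k : Nat) (s : PySem.Set Int) (x : Int), x ∈ s → x ∈ (roundB c E)^[k] s := by
  intro k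
  induction k with
  | zero => intro s x hx; exact hx
  | succ k ih =>
    intro s x hx
    rw [Function.iterate_succ_apply]
    exact ih (roundB c E s) x (growB c E s x hx)

theorem fireB (c : Int) (E : List (Int × Int)) :
    ∀ (s : PySem.Set Int) (r p : Int), (r, p) ∈ E → r < c → r ∈ s →
    p ∈ roundB c E s := by
  induction E with
  | nil => intro s r p he; exact absurd he (List.not_mem_nil)
  | cons e tl ih =>
    intro s r p he hc hr
    rcases List.mem_cons.1 he with he | he
    · have hstep : stepB c s e = PySem.Set.add s p := by
        unfold stepB
        rw [← he]
        rw [if_pos hc, if_pos ((PySem.Set.contains_iff s r).2 hr)]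
      show p ∈ roundB c tl (stepB c s e)
      rw [hstep]
      exact growB c tl _ p ((PySem.Set.mem_add _ _ _).2 (Or.inr rfl))
    · exact ih (stepB c s e) r p he hc (mem_stepB c s e r hr)

-- On a list all of whose required lengths are ≥ r (indices ≥ 0), a value r never enters A's set.
theorem notinA (c : Int) (E : List (Int × Int)) :
    ∀ (st : PySem.Set Int × Int) (r : Int), r ∉ st.1 →
    (∀ e ∈ E, r ≤ e.2 ∧ 0 ≤ e.1) → r ∉ (E.foldl (stepA c) st).1 := by
  induction E with
  | nil => intro st r hr _; exact hr
  | cons e tl ih =>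
    intro st r hr hE
    apply ih (stepA c st e) r _ (fun q hq => hE q (List.mem_cons_of_mem _ hq))
    unfold stepA
    split_ifs with h1 h2
    · exact hr
    · intro hmem
      rcases (PySem.Set.mem_add _ _ _).1 hmem with h | h
      · exact hr h
      · obtain ⟨hle, hpos⟩ := hE e (List.mem_cons_self)
        have hre : r = e.2 := by omega
        exact hr (hre ▸ (PySem.Set.contains_iff st.1 e.2).1 h2)
    · exact hr

-- A's final set is closed under the edges: req fired ⇒ prod present (uses sortedness).
theorem closedA (c : Int) (E : List (Int × Int)) :
    ∀ (st : PySem.Set Int × Int),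
    E.Pairwise (fun p q => p.2 ≤ q.2) → (∀ e ∈ E, 0 ≤ e.1) →
    ∀ e0 ∈ E, e0.2 < c → e0.2 ∈ (E.foldl (stepA c) st).1 →
    e0.2 + e0.1 ∈ (E.foldl (stepA c) st).1 := by
  induction E with
  | nil => intro st _ _ e0 he0; exact absurd he0 (List.not_mem_nil)
  | cons e tl ih =>
    intro st hpw hpos e0 he0 hc hin
    rcases List.pairwise_cons.mp hpw with ⟨hhead, htl⟩
    simp only [List.foldl_cons] at hin ⊢
    rcases List.mem_cons.1 he0 with he0 | he0
    · subst he0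
      by_cases hcs : PySem.Set.contains st.1 e0.2
      · have hstep : stepA c st e0 =
            (PySem.Set.add st.1 (e0.2 + e0.1), max st.2 (e0.2 + e0.1)) := by
          unfold stepA; rw [if_neg (by omega), if_pos hcs]
        rw [hstep]
        exact growA c tl _ _ ((PySem.Set.mem_add _ _ _).2 (Or.inr rfl))
      · have hstep : stepA c st e0 = st := by
          unfold stepA; rw [if_neg (by omega), if_neg hcs]
        rw [hstep] at hin
        exfalso
        apply notinA c tl st e0.2
          (fun h => hcs ((PySem.Set.contains_iff st.1 e0.2).2 h))
          (fun q hq => ⟨hhead q hq, hpos q (List.mem_cons_of_mem _ hq)⟩)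
        exact hin
    · exact ih (stepA c st e) htl (fun q hq => hpos q (List.mem_cons_of_mem _ hq)) e0 he0 hc hin

-- Each of A's sequential firings is covered by one relaxation round of B.
theorem subAB (c : Int) (EB : List (Int × Int)) :
    ∀ (EA : List (Int × Int)) (st : PySem.Set Int × Int),
    (∀ e ∈ EA, ((e.2, e.2 + e.1) : Int × Int) ∈ EB) →
    ∀ x ∈ (EA.foldl (stepA c) st).1, x ∈ (roundB c EB)^[EA.length] st.1 := by
  intro EA
  induction EA with
  | nil => intro st _ x hx; exact hx
  | cons e tl ih =>
    intro st H x hx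
    simp only [List.foldl_cons, List.length_cons] at hx ⊢
    have hsub : ∀ y ∈ (stepA c st e).1, y ∈ roundB c EB st.1 := by
      intro y hy
      unfold stepA at hy
      split_ifs at hy with h1 h2
      · exact growB c EB st.1 y hy
      · rcases (PySem.Set.mem_add _ _ _).1 hy with h | h
        · exact growB c EB st.1 y h
        · subst h
          exact fireB c EB st.1 e.2 (e.2 + e.1) (H e (List.mem_cons_self)) (by omega)
            ((PySem.Set.contains_iff st.1 e.2).1 h2)
      · exact growB c EB st.1 y hy
    have hx' := ih (stepA c st e) (fun q hq => H q (List.mem_cons_of_mem _ hq)) x hx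
    rw [Function.iterate_succ_apply]
    exact iter_mono c EB tl.length _ _ hsub x hx'

-- Anything B reaches lies in any edge-closed superset of the start.
theorem roundB_sub (c : Int) (T : PySem.Set Int) :
    ∀ (E : List (Int × Int)) (s : PySem.Set Int),
    (∀ e ∈ E, e.1 < c → e.1 ∈ T → e.2 ∈ T) → (∀ x ∈ s, x ∈ T) →
    ∀ x ∈ E.foldl (stepB c) s, x ∈ T := by
  intro E
  induction E with
  | nil => intro s _ hs x hx; exact hs x hx
  | cons e tl ih =>
    intro s Hcl hs x hx
    apply ih (stepB c s e) (fun q hq => Hcl q (List.mem_cons_of_mem _ hq)) _ x hx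
    intro y hy
    unfold stepB at hy
    split_ifs at hy with h1 h2
    · rcases (PySem.Set.mem_add _ _ _).1 hy with h | h
      · exact hs y h
      · subst h
        exact Hcl e (List.mem_cons_self) h1 (hs e.1 ((PySem.Set.contains_iff s e.1).1 h2))
    · exact hs y hy
    · exact hs y hy

theorem iter_sub (c : Int) (T : PySem.Set Int) (E : List (Int × Int))
    (Hcl : ∀ e ∈ E, e.1 < c → e.1 ∈ T → e.2 ∈ T) :
    ∀ (k : Nat) (s : PySem.Set Int), (∀ x ∈ s, x ∈ T) →
    ∀ x ∈ (roundB c E)^[k] s, x ∈ T := by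
  intro k
  induction k with
  | zero => intro s hs x hx; exact hs x hx
  | succ k ih =>
    intro s hs x hx
    rw [Function.iterate_succ_apply] at hx
    exact ih (roundB c E s) (roundB_sub c T E s Hcl hs) x hx

-- A's running result is the maximum element of A's set.
theorem maxInvA (c : Int) (E : List (Int × Int)) :
    ∀ (st : PySem.Set Int × Int), st.2 ∈ st.1 → (∀ x ∈ st.1, x ≤ st.2) →
    (E.foldl (stepA c) st).2 ∈ (E.foldl (stepA c) st).1 ∧
    ∀ x ∈ (E.foldl (stepA c) st).1, x ≤ (E.foldl (stepA c) st).2 := by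
  induction E with
  | nil => intro st h1 h2; exact ⟨h1, h2⟩
  | cons e tl ih =>
    intro st h1 h2
    simp only [List.foldl_cons]
    apply ih (stepA c st e)
    · unfold stepA
      split_ifs with hc hf
      · exact h1
      · rcases le_total st.2 (e.2 + e.1) with h | h
        · simp only [max_eq_right h]
          exact (PySem.Set.mem_add _ _ _).2 (Or.inr rfl)
        · simp only [max_eq_left h]
          exact (PySem.Set.mem_add _ _ _).2 (Or.inl h1)
      · exact h1
    · unfold stepA
      split_ifs with hc hf
      · exact h2
      · intro x hx
        rcases (PySem.Set.mem_add _ _ _).1 hx with h | h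
        · exact le_trans (h2 x h) (le_max_left _ _)
        · exact h ▸ le_max_right _ _
      · exact h2

-- B's outer-loop body: one round plus the early-exit (no-change) check.
def roundEE (c : Int) (E : List (Int × Int)) (st : PySem.Set Int × Bool) : PySem.Set Int × Bool :=
  if st.2 then st
  else
    let s' := roundB c E st.1
    if PySem.Set.len s' = PySem.Set.len st.1 then (s', true) else (s', false)

-- A round only appends new elements to the set.
theorem roundB_prefix (c : Int) (E : List (Int × Int)) :
    ∀ s : PySem.Set Int, ∃ Δ, roundB c E s = s ++ Δ := by
  induction E with
  | nil => intro s; exact ⟨[], (List.append_nil s).symm⟩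
  | cons e tl ih =>
    intro s
    have hstep : ∃ δ, stepB c s e = s ++ δ := by
      unfold stepB
      split_ifs with h1 h2
      · rw [PySem.Set.add_eq_ite]
        split_ifs with h3
        · exact ⟨[], by simp⟩
        · exact ⟨[e.2], rfl⟩
      · exact ⟨[], by simp⟩
      · exact ⟨[], by simp⟩
    obtain ⟨δ, hδ⟩ := hstep
    obtain ⟨Δ, hΔ⟩ := ih (stepB c s e)
    refine ⟨δ ++ Δ, ?_⟩
    show roundB c tl (stepB c s e) = s ++ (δ ++ Δ)
    rw [hΔ, hδ, List.append_assoc]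

-- A round that does not change the size changes nothing.
theorem roundB_fix_of_len (c : Int) (E : List (Int × Int)) (s : PySem.Set Int)
    (h : PySem.Set.len (roundB c E s) = PySem.Set.len s) : roundB c E s = s := by
  obtain ⟨Δ, hΔ⟩ := roundB_prefix c E s
  rw [hΔ] at h ⊢
  have hΔnil : Δ = [] := by
    cases Δ with
    | nil => rfl
    | cons d Δ' =>
      exfalso
      simp [PySem.Set.len, List.length_append] at h
      omega
  rw [hΔnil, List.append_nil]

theorem iterate_fix (c : Int) (E : List (Int × Int)) (k : Nat) (s : PySem.Set Int)
    (h : roundB c E s = s) : (roundB c E)^[k] s = s := by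
  induction k with
  | zero => rfl
  | succ k ih => rw [Function.iterate_succ_apply, h, ih]

theorem foldlEE_true (c : Int) (E : List (Int × Int)) :
    ∀ (l : List Int) (s : PySem.Set Int),
    (l.foldl (fun (st : PySem.Set Int × Bool) (_ : Int) => roundEE c E st) (s, true)).1 = s := by
  intro l
  induction l with
  | nil => intro s; rfl
  | cons x t ih =>
    intro s
    simp only [List.foldl_cons]
    rw [show roundEE c E (s, true) = (s, true) from rfl]
    exact ih s

-- The early-exit loop over a list of length k computes k rounds' fixpoint progress.
theorem foldlEE (c : Int) (E : List (Int × Int)) :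
    ∀ (l : List Int) (s : PySem.Set Int),
    (l.foldl (fun (st : PySem.Set Int × Bool) (_ : Int) => roundEE c E st) (s, false)).1 =
      (roundB c E)^[l.length] s := by
  intro l
  induction l with
  | nil => intro s; rfl
  | cons x t ih =>
    intro s
    simp only [List.foldl_cons, List.length_cons]
    by_cases hlen : PySem.Set.len (roundB c E s) = PySem.Set.len s
    · have hst : roundEE c E (s, false) = (roundB c E s, true) := by
        unfold roundEE
        simp only [if_pos hlen]
        rfl
      have hfix : roundB c E s = s := roundB_fix_of_len c E s hlen
      rw [hst, foldlEE_true c E t (roundB c E s), hfix,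
        Function.iterate_succ_apply, hfix, iterate_fix c E t.length s hfix]
    · have hst : roundEE c E (s, false) = (roundB c E s, false) := by
        unfold roundEE
        simp only [if_neg hlen]
        rfl
      rw [hst, ih (roundB c E s), Function.iterate_succ_apply]

theorem solve_eq (n : Int) (a : List Int) (hpre : Pre_solve n a) :
    solve n a = solve_alt n a := by
  by_cases hn1 : n = 1
  · subst hn1; rfl
  by_cases hn0 : n ≤ 0
  · unfold solve solve_alt
    rw [if_neg hn1, if_neg hn1]
    simp [PySem.List.pyRange_one_eq_nil hn0, PySem.List.max?_id_cons,
      PySem.Set.add, PySem.Set.empty]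
  · have h1 : 1 < n := by omega
    have hlen : n ≤ (a.length : Int) := hpre h1
    unfold solve solve_alt
    rw [if_neg hn1, if_neg hn1]
    simp only [PySem.List.foldl_append_singleton_eq_map, List.nil_append]
    -- A's enumerate over the mapped range is the list of (index, required) pairs
    have hEI : PySem.List.enumerate (List.map (fun x => PySem.List.pyGetD a x 0 + x) (PySem.List.pyRange 0 n 1)) =
        (PySem.List.pyRange 0 n 1).map (fun i => (i, PySem.List.pyGetD a i 0 + i)) := by
      rw [PySem.List.enumerate_eq_map_pyRange _ (0 : Int)]
      have hlen2 : PySem.List.len (List.map (fun x => PySem.List.pyGetD a x 0 + x) (PySem.List.pyRange 0 n 1)) = n := by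
        simp [PySem.List.length_pyRange_one]
        omega
      rw [hlen2]
      apply List.map_congr_left
      intro j hj
      rcases (PySem.List.mem_pyRange_one).1 hj with ⟨hj0, hjn⟩
      rw [PySem.List.pyGetD_map_pyRange_of_nonneg _ n j _ hj0 hjn]
    rw [hEI]
    set EI := (PySem.List.pyRange 0 n 1).map (fun i => (i, PySem.List.pyGetD a i 0 + i)) with hEIdef
    set rls := PySem.List.sorted EI (fun x => x.2) with hrlsdef
    have hrlsmem : ∀ p, p ∈ rls ↔ p ∈ EI := fun p => (PySem.List.sorted_perm EI _ _).mem_iff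
    have hEImem : ∀ p : Int × Int, p ∈ EI ↔ ∃ i, (0 ≤ i ∧ i < n) ∧ p = (i, PySem.List.pyGetD a i 0 + i) := by
      intro p
      rw [hEIdef]
      simp only [List.mem_map, PySem.List.mem_pyRange_one]
      constructor
      · rintro ⟨i, hi, rfl⟩; exact ⟨i, hi, rfl⟩
      · rintro ⟨i, hi, rfl⟩; exact ⟨i, hi, rfl⟩
    have hrlslen : ((rls.length : Nat) : Int) = n := by
      have hp := (PySem.List.sorted_perm EI (fun x => x.2) false).length_eq
      rw [hrlsdef, hp, hEIdef]
      simp [PySem.List.length_pyRange_one]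
      omega
    conv_lhs => rw [show PySem.List.pyRange 0 n 1 = PySem.List.pyRange 0 (rls.length : Int) 1 from by rw [hrlslen]]
    -- A's loop over indices into rls is a fold of stepA over rls
    refine Eq.trans (b := (rls.foldl (stepA (n * n)) (PySem.Set.add PySem.Set.empty n, n)).2) ?_ ?_
    · exact congrArg Prod.snd
        (PySem.List.foldl_pyRange_zero_pyGetD' rls ((0 : Int), (0 : Int)) (stepA (n * n)) (PySem.Set.add PySem.Set.empty n, n))
    -- B's edge list
    set EB := (PySem.List.pyRange 0 n 1).map
      (fun i => (PySem.List.pyGetD a i 0 + i, PySem.List.pyGetD a i 0 + 2 * i)) with hEBdef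
    have hEBmem : ∀ p : Int × Int, p ∈ EB ↔ ∃ i, (0 ≤ i ∧ i < n) ∧
        p = (PySem.List.pyGetD a i 0 + i, PySem.List.pyGetD a i 0 + 2 * i) := by
      intro p
      rw [hEBdef]
      simp only [List.mem_map, PySem.List.mem_pyRange_one]
      constructor
      · rintro ⟨i, hi, rfl⟩; exact ⟨i, hi, rfl⟩
      · rintro ⟨i, hi, rfl⟩; exact ⟨i, hi, rfl⟩
    -- B's outer loop is iteration of roundB
    have hlenR : (PySem.List.pyRange 0 n 1).length = rls.length := by
      simp [PySem.List.length_pyRange_one]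
      omega
    show (rls.foldl (stepA (n * n)) (PySem.Set.add PySem.Set.empty n, n)).2 =
      (PySem.List.max?
        ((PySem.List.pyRange 0 n 1).foldl
          (fun (st : PySem.Set Int × Bool) (_ : Int) => roundEE (n * n) EB st)
          (PySem.Set.add PySem.Set.empty n, false)).1
        (fun x => x)).getD 0
    rw [foldlEE (n * n) EB (PySem.List.pyRange 0 n 1), hlenR]
    set c := n * n with hc
    set s0 : PySem.Set Int := PySem.Set.add PySem.Set.empty n with hs0
    set SA := rls.foldl (stepA c) (s0, n) with hSA
    set SB := (roundB c EB)^[rls.length] s0 with hSB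
    have hs0mem : ∀ x, x ∈ s0 ↔ x = n := by
      intro x
      rw [hs0]
      constructor
      · intro hx
        rcases (PySem.Set.mem_add _ _ _).1 hx with h | h
        · exact absurd h (List.not_mem_nil)
        · exact h
      · rintro rfl; exact (PySem.Set.mem_add _ _ _).2 (Or.inr rfl)
    -- edge correspondences
    have hpos : ∀ e ∈ rls, 0 ≤ e.1 := by
      intro e he
      rcases (hEImem e).1 ((hrlsmem e).1 he) with ⟨i, hi, rfl⟩
      exact hi.1
    have hAB : ∀ e ∈ rls, ((e.2, e.2 + e.1) : Int × Int) ∈ EB := by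
      intro e he
      rcases (hEImem e).1 ((hrlsmem e).1 he) with ⟨i, hi, rfl⟩
      refine (hEBmem _).2 ⟨i, hi, ?_⟩
      simp only [Prod.mk.injEq]
      constructor
      · trivial
      · ring
    have hpw : rls.Pairwise (fun p q => p.2 ≤ q.2) :=
      PySem.List.sorted_pairwise EI (fun x => x.2)
    have hclosed : ∀ e ∈ EB, e.1 < c → e.1 ∈ SA.1 → e.2 ∈ SA.1 := by
      intro e he hec hein
      rcases (hEBmem e).1 he with ⟨i, hi, rfl⟩
      have he0 : ((i, PySem.List.pyGetD a i 0 + i) : Int × Int) ∈ rls :=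
        (hrlsmem _).2 ((hEImem _).2 ⟨i, hi, rfl⟩)
      have := closedA c rls (s0, n) hpw hpos (i, PySem.List.pyGetD a i 0 + i) he0 hec hein
      simpa [show PySem.List.pyGetD a i 0 + i + i = PySem.List.pyGetD a i 0 + 2 * i from by ring] using this
    -- the two sets have the same members
    have hmem : ∀ x, x ∈ SA.1 ↔ x ∈ SB := by
      intro x
      constructor
      · intro hx
        exact subAB c EB rls (s0, n) hAB x hx
      · intro hx
        apply iter_sub c SA.1 EB hclosed rls.length s0 _ x hx
        intro y hy
        rw [hs0mem y] at hy
        rw [hy]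
        exact growA c rls (s0, n) n ((hs0mem n).2 rfl)
    -- A's result is the max of SA.1; B's result is the max of SB
    obtain ⟨hres_mem, hres_max⟩ := maxInvA c rls (s0, n) ((hs0mem n).2 rfl)
      (by intro x hx; rw [hs0mem x] at hx; omega)
    have hSBne : SB ≠ [] := by
      intro hnil
      have : n ∈ SB := iter_grow c EB rls.length s0 n ((hs0mem n).2 rfl)
      rw [hnil] at this
      exact absurd this (List.not_mem_nil)
    obtain ⟨m, hm⟩ : ∃ m, PySem.List.max? SB (fun x => x) = some m := by
      cases hmx : PySem.List.max? SB (fun x => x) with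
      | none => exact absurd ((PySem.List.max?_eq_none_iff _ _).1 hmx) hSBne
      | some m => exact ⟨m, rfl⟩
    have hmmem : m ∈ SB := PySem.List.max?_mem hm
    have hmmax : ∀ y ∈ SB, y ≤ m := PySem.List.max?_isMax hm
    rw [hm]
    have h1' : m ≤ SA.2 := hres_max m ((hmem m).2 hmmem)
    have h2' : SA.2 ≤ m := hmmax SA.2 ((hmem SA.2).1 hres_mem)
    simp only [Option.getD_some]
    omega

-- ===== VERDICT (by name: the statement is the Claim_ definition above) =====
theorem solve_spec : Claim_equal_solve := by
  unfold Claim_equal_solve Spec_solve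
  intro n a _ hpre
  exact solve_eq n a hpre
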